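-- pv_equiv track=rewrite | github.com/jake20001/Hello | everydays/students/2.py | fmax
-- ===== SOURCE A (Python) =====
-- def fmax(a):
--     imax = a[0] + a[1]
--     index = 0
--     for i in range(1,len(a)-1):
--         if (a[i]+a[i+1])>imax:
--             imax = a[i] + a[i+1]
--             index = i
--     return index
-- ===== SOURCE B (Python) =====
-- def fmax(a):
--     sums = [a[i] + a[i + 1] for i in range(len(a) - 1)]
--     return sums.index(max(sums))
-- ===== Notes on version B (the rewrite author's own statement) =====
-- stated objective: idiomatic
-- what changed: replaces the streaming argmax with a running (best,index) pair by materializing the adjacent-pair-sum list once and returning sums.index(max(sums)), which gives the same first-maximum index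
-- outside the precondition, e.g. on fmax([]): A raises IndexError, B raises ValueError; on fmax([0]): A raises IndexError, B raises ValueError; on fmax([1]): A raises IndexError, B raises ValueError
import Mathlib
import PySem

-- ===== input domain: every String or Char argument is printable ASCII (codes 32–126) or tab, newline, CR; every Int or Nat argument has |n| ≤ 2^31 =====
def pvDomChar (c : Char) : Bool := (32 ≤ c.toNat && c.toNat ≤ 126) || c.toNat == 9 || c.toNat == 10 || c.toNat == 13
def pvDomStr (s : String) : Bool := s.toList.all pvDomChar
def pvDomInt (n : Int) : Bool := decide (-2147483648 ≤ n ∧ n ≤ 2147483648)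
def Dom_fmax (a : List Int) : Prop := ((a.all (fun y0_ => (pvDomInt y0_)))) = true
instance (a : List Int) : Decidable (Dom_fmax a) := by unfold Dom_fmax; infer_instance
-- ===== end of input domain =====

-- B replaces A's streaming argmax (running best/index pair) by building the adjacent-pair-sum
-- list once and returning the first index of its maximum (sums.index(max(sums))); same value,
-- more idiomatic decomposition. Pre_ excludes lists of length < 2, on which A raises IndexError.


-- ===== PORT A =====
-- imax/index are the two components of the fold state; the loop is the fold over range(1, len(a)-1).
def fmax (a : List Int) : Int :=
  ((PySem.List.pyRange 1 ((a.length : Int) - 1)).foldl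
      (fun (st : Int × Int) i =>
        if PySem.List.pyGetD a i 0 + PySem.List.pyGetD a (i + 1) 0 > st.1 then
          (PySem.List.pyGetD a i 0 + PySem.List.pyGetD a (i + 1) 0, i)
        else st)
      (PySem.List.pyGetD a 0 0 + PySem.List.pyGetD a 1 0, 0)).2

-- ===== PORT B =====
-- sums = [a[i] + a[i+1] for i in range(len(a) - 1)]
def pvSums (a : List Int) : List Int :=
  (PySem.List.pyRange 0 ((a.length : Int) - 1)).map
    (fun i => PySem.List.pyGetD a i 0 + PySem.List.pyGetD a (i + 1) 0)

-- return sums.index(max(sums))  (max([]) raises; outside Pre_, totalized by 0)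
def fmax_alt (a : List Int) : Int :=
  match PySem.List.max? (pvSums a) (fun x => x) with
  | some m => ((PySem.List.index? (pvSums a) m).getD 0 : Nat)
  | none => 0

-- ===== PRECONDITION & SPEC =====
-- A indexes a[0] and a[1] unconditionally, so it raises IndexError on lists of length < 2.
def Pre_fmax (a : List Int) : Prop := 2 ≤ a.length
instance (a : List Int) : Decidable (Pre_fmax a) := by unfold Pre_fmax; infer_instance
def pvWitness_fmax : List Int := ([1, 3, 2] : List Int)
def Spec_fmax (a : List Int) (out : Int) : Prop := out = fmax_alt a
instance (a : List Int) (out : Int) : Decidable (Spec_fmax a out) := by unfold Spec_fmax; infer_instance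

-- ===== CLAIM (what is proved, stated in full; the proofs are below) =====
def Claim_equal_fmax : Prop := ∀ (a : List Int), Dom_fmax a → Pre_fmax a → Spec_fmax a (fmax a)

-- ===== LEMMAS AND PROOFS =====

-- pyGetD at a Nat-cast in-range index is getElem.
theorem pvPg (s : List Int) (j : Nat) (hj : j < s.length) :
    PySem.List.pyGetD s (j : Int) 0 = s[j] := by
  rw [PySem.List.pyGetD_eq_getElem s 0 (by positivity) (by exact_mod_cast hj)]
  simp

-- A's loop body, abstracted to act on the list of adjacent-pair sums.
def pvStep (s : List Int) (st : Int × Int) (i : Int) : Int × Int :=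
  if PySem.List.pyGetD s i 0 > st.1 then (PySem.List.pyGetD s i 0, i) else st

-- Invariant of A's fold: after scanning indices [1, k), st holds the max of s[0..k)
-- and the first index achieving it.
theorem pvInv (s : List Int) (k : Nat) (h1 : 1 ≤ k) (h2 : k ≤ s.length) :
    (0 ≤ ((PySem.List.pyRange 1 (k : Int)).foldl (pvStep s) (PySem.List.pyGetD s 0 0, 0)).2 ∧
      ((PySem.List.pyRange 1 (k : Int)).foldl (pvStep s) (PySem.List.pyGetD s 0 0, 0)).2 < (k : Int)) ∧
    PySem.List.pyGetD s ((PySem.List.pyRange 1 (k : Int)).foldl (pvStep s) (PySem.List.pyGetD s 0 0, 0)).2 0 =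
      ((PySem.List.pyRange 1 (k : Int)).foldl (pvStep s) (PySem.List.pyGetD s 0 0, 0)).1 ∧
    (∀ j : Int, 0 ≤ j → j < (k : Int) →
      PySem.List.pyGetD s j 0 ≤ ((PySem.List.pyRange 1 (k : Int)).foldl (pvStep s) (PySem.List.pyGetD s 0 0, 0)).1) ∧
    (∀ j : Int, 0 ≤ j → j < ((PySem.List.pyRange 1 (k : Int)).foldl (pvStep s) (PySem.List.pyGetD s 0 0, 0)).2 →
      PySem.List.pyGetD s j 0 < ((PySem.List.pyRange 1 (k : Int)).foldl (pvStep s) (PySem.List.pyGetD s 0 0, 0)).1) := by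
  induction k with
  | zero => omega
  | succ k ih =>
    by_cases hk : k = 0
    · subst hk
      rw [show ((1 : Nat) : Int) = 1 by norm_num, PySem.List.pyRange_one_eq_nil (by omega)]
      refine ⟨⟨by simp, by simp⟩, rfl, ?_, ?_⟩
      · intro j hj0 hj1
        have : j = 0 := by omega
        subst this; simp
      · intro j hj0 hj1; simp at hj1; omega
    · have hk1 : 1 ≤ k := by omega
      have hk2 : k ≤ s.length := by omega
      have ih' := ih hk1 hk2
      have hsplit : PySem.List.pyRange 1 ((k + 1 : Nat) : Int) =
          PySem.List.pyRange 1 (k : Int) ++ [(k : Int)] := by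
        have := PySem.List.pyRange_one_succ_right (a := 1) (b := (k : Int)) (by exact_mod_cast hk1)
        rw [show ((k + 1 : Nat) : Int) = (k : Int) + 1 by push_cast; ring, this]
      rw [hsplit, List.foldl_append]
      set st := (PySem.List.pyRange 1 (k : Int)).foldl (pvStep s) (PySem.List.pyGetD s 0 0, 0) with hst
      obtain ⟨⟨hb0, hb1⟩, hval, hmax, hfirst⟩ := ih'
      simp only [List.foldl_cons, List.foldl_nil]
      unfold pvStep
      split_ifs with hcmp
      · refine ⟨⟨by omega, by push_cast; omega⟩, rfl, ?_, ?_⟩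
        · intro j hj0 hj1
          by_cases hjk : j < (k : Int)
          · exact le_of_lt (lt_of_le_of_lt (hmax j hj0 hjk) hcmp)
          · have : j = (k : Int) := by push_cast at hj1; omega
            subst this; exact le_refl _
        · intro j hj0 hj1
          exact lt_of_le_of_lt (hmax j hj0 hj1) hcmp
      · refine ⟨⟨hb0, by push_cast; omega⟩, hval, ?_, hfirst⟩
        intro j hj0 hj1
        by_cases hjk : j < (k : Int)
        · exact hmax j hj0 hjk
        · have : j = (k : Int) := by push_cast at hj1; omega
          subst this; omega

-- ===== VERDICT (by name: the statement is the Claim_ definition above) =====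
theorem fmax_spec : Claim_equal_fmax := by
  intro a _hdom hpre
  unfold Spec_fmax fmax_alt
  unfold Pre_fmax at hpre
  have hlen : (pvSums a).length = a.length - 1 := by
    unfold pvSums
    rw [List.length_map, PySem.List.length_pyRange_one]; omega
  have hm1 : 1 ≤ (pvSums a).length := by omega
  have hb : ((pvSums a).length : Int) = (a.length : Int) - 1 := by omega
  have hsel : ∀ i : Int, 0 ≤ i → i < ((pvSums a).length : Int) →
      PySem.List.pyGetD (pvSums a) i 0 = PySem.List.pyGetD a i 0 + PySem.List.pyGetD a (i + 1) 0 := by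
    intro i h0 h1
    unfold pvSums
    exact PySem.List.pyGetD_map_pyRange_of_nonneg _ _ i 0 h0 (by omega)
  -- A's fold is the abstract fold over the sums list
  have hA : fmax a = ((PySem.List.pyRange 1 ((pvSums a).length : Int)).foldl (pvStep (pvSums a))
      (PySem.List.pyGetD (pvSums a) 0 0, 0)).2 := by
    unfold fmax
    rw [hb]
    have hseed : PySem.List.pyGetD (pvSums a) 0 0 =
        PySem.List.pyGetD a 0 0 + PySem.List.pyGetD a 1 0 := by
      have := hsel 0 (le_refl 0) (by exact_mod_cast hm1)
      simpa using this
    rw [hseed]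
    refine congrArg Prod.snd (PySem.List.foldl_congr_mem _ _ _ _ ?_)
    intro acc x hx
    rw [PySem.List.mem_pyRange_one] at hx
    unfold pvStep
    rw [hsel x (by omega) (by omega)]
  have hinv := pvInv (pvSums a) (pvSums a).length hm1 (le_refl _)
  set st := (PySem.List.pyRange 1 ((pvSums a).length : Int)).foldl (pvStep (pvSums a))
      (PySem.List.pyGetD (pvSums a) 0 0, 0) with hstdef
  obtain ⟨⟨hb0, hb1⟩, hval, hmaxall, hfirst⟩ := hinv
  have hne : pvSums a ≠ [] := by
    intro h; rw [h] at hlen; simp at hlen; omega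
  rcases hM : PySem.List.max? (pvSums a) (fun x => x) with _ | M
  · exact absurd ((PySem.List.max?_eq_none_iff (pvSums a) _).mp hM) hne
  have hMmem : M ∈ pvSums a := PySem.List.max?_mem hM
  have hMmax : ∀ y ∈ pvSums a, y ≤ M := by
    have := PySem.List.max?_isMax (key := fun x => x) hM
    simpa using this
  -- st.1 = M
  have htlt : st.2.toNat < (pvSums a).length := by omega
  have hst_elem : (pvSums a)[st.2.toNat] = st.1 := by
    rw [← PySem.List.pyGetD_eq_getElem (pvSums a) 0 hb0 hb1, hval]
  have hstmem : st.1 ∈ pvSums a := hst_elem ▸ List.getElem_mem _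
  have hMle : M ≤ st.1 := by
    obtain ⟨j, hj, hjv⟩ := List.mem_iff_getElem.mp hMmem
    have h := hmaxall (j : Int) (by positivity) (by exact_mod_cast hj)
    rwa [pvPg (pvSums a) j hj, hjv] at h
  have hstM : st.1 = M := le_antisymm (hMmax _ hstmem) hMle
  -- index? is some k0, and st.2 = k0
  have hsome : (PySem.List.index? (pvSums a) M).isSome :=
    (PySem.List.index?_isSome_iff (pvSums a) M).mpr hMmem
  rcases hk0 : PySem.List.index? (pvSums a) M with _ | k0
  · rw [hk0] at hsome; simp at hsome
  obtain ⟨hk0len, hk0v, hk0first⟩ := PySem.List.getElem_of_index?_eq_some hk0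
  have hteq : st.2 = (k0 : Int) := by
    rcases lt_trichotomy st.2.toNat k0 with h | h | h
    · exact absurd (hstM ▸ hst_elem) (hk0first st.2.toNat h)
    · omega
    · have hlt := hfirst (k0 : Int) (by positivity) (by omega)
      rw [pvPg (pvSums a) k0 hk0len, hk0v, hstM] at hlt
      omega
  simp only [hk0, Option.getD_some]
  rw [hA, hteq]
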